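-- pv_equiv track=rewrite | github.com/jmtth/callMeBaby | src/utils/number_utils.py | is_valid_number_fragment
-- ===== SOURCE A (Python) =====
-- def is_valid_number_fragment(text: str) -> bool:
--     """Check if the text is a valid fragment of a number.
--     Valid fragments can be empty, contain digits, a single decimal point,
--     a single 'e' for scientific notation, and a '-' for negative numbers.
--     The '-' can only be at the start or immediately after an 'e'.
--
--     args:
--         str: the string fragment of a number
--
--     returns:
--         bool: true if it is a valid number fragment
--     """
--     if text == "":
--         return True
--
--     chars = set("0123456789-.e")
--     if any(ch not in chars for ch in text):
--         return False
--
--     if text.count("e") > 1: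
--         return False
--     if text.count(".") > 1:
--         return False
--
--     e_pos = text.find("e")
--     if e_pos != -1 and text.find(".", e_pos) != -1:
--         return False
--
--     if "-" in text:
--         for i, ch in enumerate(text):
--             if ch != "-":
--                 continue
--             if i == 0:
--                 continue
--             if i > 0 and text[i - 1] == "e":
--                 continue
--             return False
--
--     return True
-- ===== SOURCE B (Python) =====
-- def is_valid_number_fragment(text: str) -> bool:
--     """Single left-to-right pass keeping state flags instead of counts/finds."""
--     seen_e = False
--     seen_dot = False
--     prev = None
--     for ch in text:
--         if ch not in "0123456789-.e":
--             return False
--         if ch == "e":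
--             if seen_e:
--                 return False
--             seen_e = True
--         elif ch == ".":
--             if seen_dot or seen_e:
--                 return False
--             seen_dot = True
--         elif ch == "-":
--             if prev is not None and prev != "e":
--                 return False
--         prev = ch
--     return True
-- ===== Notes on version B (the rewrite author's own statement) =====
-- stated objective: simpler
-- what changed: Replaced the set-membership scan, two count() passes, two find() passes and the minus loop by a single stateful left-to-right traversal with seen_e/seen_dot flags and the previous character.
import Mathlib
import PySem

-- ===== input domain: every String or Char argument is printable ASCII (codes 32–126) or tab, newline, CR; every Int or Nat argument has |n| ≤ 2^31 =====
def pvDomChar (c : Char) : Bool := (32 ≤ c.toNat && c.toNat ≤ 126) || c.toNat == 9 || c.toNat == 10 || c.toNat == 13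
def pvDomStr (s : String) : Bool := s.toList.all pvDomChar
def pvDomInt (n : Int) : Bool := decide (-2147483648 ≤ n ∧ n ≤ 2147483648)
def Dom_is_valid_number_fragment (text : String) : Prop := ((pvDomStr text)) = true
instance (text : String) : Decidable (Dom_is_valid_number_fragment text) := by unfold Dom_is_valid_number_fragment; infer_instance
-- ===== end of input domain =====

-- B replaces A's set-membership scan, two counts, two finds and the minus loop by one
-- stateful left-to-right pass (objective: simpler, single traversal).

-- ===== PORT A =====
-- the 'for i, ch in enumerate(text): …' loop that checks each '-' (returns False on the
-- first bad '-', True if the loop completes)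
def pvMinusLoop (text : List Char) : List (Int × Char) → Bool
  | [] => true
  | (i, ch) :: rest =>
    if ch ≠ '-' then pvMinusLoop text rest
    else if i == 0 then pvMinusLoop text rest
    else if decide (i > 0) && (PySem.List.pyGet? text (i - 1) == some 'e') then pvMinusLoop text rest
    else false

def is_valid_number_fragment (text : String) : Bool :=
  if text == "" then true
  else
    let chars : PySem.Set Char := PySem.Set.ofList "0123456789-.e".toList
    if text.toList.any (fun ch => !(PySem.Set.contains chars ch)) then false
    else if PySem.Str.count text "e" > 1 then false
    else if PySem.Str.count text "." > 1 then false
    else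
      let e_pos := PySem.Str.find text "e"
      if e_pos != -1 && PySem.Str.findFrom text "." e_pos none != -1 then false
      else if PySem.Str.isIn "-" text then pvMinusLoop text.toList (PySem.List.enumerate text.toList)
      else true

-- ===== PORT B =====
-- single pass; state: seen_e, seen_dot, previous character (none at index 0)
def pvAltGo : List Char → Bool → Bool → Option Char → Bool
  | [], _, _, _ => true
  | ch :: rest, seenE, seenD, prev =>
    if !("0123456789-.e".toList.contains ch) then false
    else if ch == 'e' then
      if seenE then false else pvAltGo rest true seenD (some ch)
    else if ch == '.' then
      if seenD || seenE then false else pvAltGo rest seenE true (some ch)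
    else if ch == '-' then
      if prev.isSome && prev != some 'e' then false else pvAltGo rest seenE seenD (some ch)
    else pvAltGo rest seenE seenD (some ch)

def is_valid_number_fragment_alt (text : String) : Bool :=
  pvAltGo text.toList false false none

-- ===== PRECONDITION & SPEC =====
def Spec_is_valid_number_fragment (text : String) (out : Bool) : Prop := out = is_valid_number_fragment_alt text
instance (text : String) (out : Bool) : Decidable (Spec_is_valid_number_fragment text out) := by unfold Spec_is_valid_number_fragment; infer_instance

-- ===== CLAIM (what is proved, stated in full; the proofs are below) =====
def Claim_equal_is_valid_number_fragment : Prop := ∀ (text : String), Dom_is_valid_number_fragment text → Spec_is_valid_number_fragment text (is_valid_number_fragment text)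

-- ===== LEMMAS AND PROOFS =====

-- 'no dot at or after an e' as a recursive boolean
def pvNoDotAfterE : List Char → Bool
  | [] => true
  | c :: cs => (if c = 'e' then !(cs.contains '.') else true) && pvNoDotAfterE cs

-- 'every - is at index 0 (prev = none) or right after an e'
def pvMinusOk : Option Char → List Char → Bool
  | _, [] => true
  | prev, c :: cs => (if c = '-' then (prev == none || prev == some 'e') else true) && pvMinusOk (some c) cs

theorem pv_count_go_singleton (c : Char) : ∀ (l : List Char) (fuel acc : Nat), l.length ≤ fuel →
    PySem.Chars.count.go [c] fuel l acc = acc + l.count c := by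
  intro l
  induction l with
  | nil => intro fuel acc h; cases fuel <;> simp [PySem.Chars.count.go]
  | cons x t ih =>
    intro fuel acc h
    cases fuel with
    | zero => simp at h
    | succ f =>
      simp only [PySem.Chars.count.go, List.isPrefixOf, List.count_cons]
      by_cases hx : c = x
      · subst hx
        simp only [BEq.rfl, Bool.true_and, if_true, List.length_nil, List.drop_zero,
          List.isPrefixOf, List.length_cons, List.drop_succ_cons]
        rw [ih f (acc+1) (by simpa using Nat.le_of_succ_le_succ h)]
        omega
      · have hbx : (c == x) = false := by simpa using hx
        simp only [List.isPrefixOf, hbx, Bool.false_and, if_false]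
        rw [ih f acc (by simpa using Nat.le_of_succ_le_succ h)]
        simp [Ne.symm hx]

theorem pv_count_singleton (c : Char) (l : List Char) :
    PySem.Chars.count l [c] = l.count c := by
  simp [PySem.Chars.count, pv_count_go_singleton c l l.length 0 le_rfl]

theorem pvNoDot_of_not_mem (l : List Char) (h : 'e' ∉ l) : pvNoDotAfterE l = true := by
  induction l with
  | nil => rfl
  | cons x t ih =>
    simp only [List.mem_cons, not_or] at h
    simp [pvNoDotAfterE, Ne.symm h.1, ih h.2]

theorem pvNoDot_append (p q : List Char) (h : 'e' ∉ p) :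
    pvNoDotAfterE (p ++ q) = pvNoDotAfterE q := by
  induction p with
  | nil => rfl
  | cons x t ih =>
    simp only [List.mem_cons, not_or] at h
    simp [pvNoDotAfterE, Ne.symm h.1, ih h.2]

theorem pvMinusOk_of_not_mem (prev : Option Char) (l : List Char) (h : '-' ∉ l) :
    pvMinusOk prev l = true := by
  induction l generalizing prev with
  | nil => rfl
  | cons x t ih =>
    simp only [List.mem_cons, not_or] at h
    simp [pvMinusOk, Ne.symm h.1, ih _ h.2]

theorem pvAltGo_eq (l : List Char) : ∀ (seenE seenD : Bool) (prev : Option Char),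
    pvAltGo l seenE seenD prev =
      (l.all (fun c => "0123456789-.e".toList.contains c)
       && decide (l.count 'e' + (cond seenE 1 0) ≤ 1)
       && decide (l.count '.' + (cond seenD 1 0) ≤ 1)
       && (cond seenE (!(l.contains '.')) true)
       && pvNoDotAfterE l
       && pvMinusOk prev l) := by
  induction l with
  | nil => intro seenE seenD prev; cases seenE <;> cases seenD <;> simp [pvAltGo, pvNoDotAfterE, pvMinusOk]
  | cons ch rest ih =>
    intro seenE seenD prev
    by_cases hall : ("0123456789-.e".toList.contains ch) = true
    · by_cases he : ch = 'e'
      · subst he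
        cases seenE with
        | true => simp [pvAltGo, List.count_cons]
        | false =>
          rw [show pvAltGo ('e'::rest) false seenD prev = pvAltGo rest true seenD (some 'e') from by
            simp [pvAltGo, hall]]
          rw [ih true seenD (some 'e')]
          simp [pvNoDotAfterE, pvMinusOk, List.count_cons, List.all_cons, hall]
          by_cases hd : pvNoDotAfterE rest = true <;> by_cases hc : ('.' ∈ rest) <;>
            simp [hd, hc] <;> omega
      · by_cases hdot : ch = '.'
        · subst hdot
          cases seenD with
          | true => simp [pvAltGo, List.count_cons]
          | false =>
            cases seenE with
            | true => simp [pvAltGo, List.contains_cons]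
            | false =>
              rw [show pvAltGo ('.'::rest) false false prev = pvAltGo rest false true (some '.') from by
                simp [pvAltGo, hall]]
              rw [ih false true (some '.')]
              simp [pvNoDotAfterE, pvMinusOk, List.count_cons, List.all_cons, hall, he]
        · by_cases hm : ch = '-'
          · subst hm
            by_cases hp : (prev.isSome && prev != some 'e') = true
            · rw [show pvAltGo ('-'::rest) seenE seenD prev = false from by
                simp [pvAltGo, hall, hp]]
              have hf : (prev == none || prev == some 'e') = false := by
                cases prev <;> simp_all
              rw [show pvMinusOk prev ('-'::rest) = false from by unfold pvMinusOk; rw [if_pos rfl, hf]; simp]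
              simp
            · rw [show pvAltGo ('-'::rest) seenE seenD prev = pvAltGo rest seenE seenD (some '-') from by
                simp only [pvAltGo, hall, Bool.not_true, Bool.false_eq_true, if_false]
                simp [hp]]
              rw [ih seenE seenD (some '-')]
              have ht : (prev == none || prev == some 'e') = true := by
                cases prev <;> simp_all
              rw [show pvMinusOk prev ('-'::rest) = pvMinusOk (some '-') rest from by
                rw [show pvMinusOk prev ('-'::rest) =
                    ((if '-' = '-' then (prev == none || prev == some 'e') else true) &&
                      pvMinusOk (some '-') rest) from rfl, if_pos rfl, ht]; simp]
              simp [pvNoDotAfterE, List.count_cons, List.all_cons, hall, he, hdot]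
          · have hbe : (ch == 'e') = false := by simpa using he
            have hbd : (ch == '.') = false := by simpa using hdot
            have hbm : (ch == '-') = false := by simpa using hm
            have hbe' : ('e' == ch) = false := by simpa using Ne.symm he
            have hbd' : ('.' == ch) = false := by simpa using Ne.symm hdot
            rw [show pvAltGo (ch::rest) seenE seenD prev = pvAltGo rest seenE seenD (some ch) from by
              simp only [pvAltGo, hall, hbe, hbd, hbm, Bool.not_true, Bool.false_eq_true, if_false]]
            rw [ih seenE seenD (some ch)]
            rw [show pvNoDotAfterE (ch::rest) = pvNoDotAfterE rest from by simp [pvNoDotAfterE, he]]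
            rw [show pvMinusOk prev (ch::rest) = pvMinusOk (some ch) rest from by simp [pvMinusOk, hm]]
            simp only [List.all_cons, hall, Bool.true_and, List.count_cons, List.contains_cons,
              hbe', hbd', if_false, add_zero, Bool.false_or]
            simp [hbe, hbd]
    · have hb : ("0123456789-.e".toList.contains ch) = false := by simpa using hall
      rw [show pvAltGo (ch::rest) seenE seenD prev = false from by
        simp only [pvAltGo, hb, Bool.not_false, if_true]]
      simp only [List.all_cons, hb, Bool.false_and]

theorem pv_getLast (pre : List Char) (tail : List Char) (h : pre ≠ []) :
    PySem.List.pyGet? (pre ++ tail) ((pre.length : Int) - 1) = pre.getLast? := by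
  rcases pre.eq_nil_or_concat with rfl | ⟨p', x, hx⟩
  · exact absurd rfl h
  · rw [List.concat_eq_append] at hx
    subst hx
    have h1 : (((p' ++ [x]).length : Int)) - 1 = ((p'.length : Nat) : Int) := by simp
    rw [h1, PySem.List.pyGet?_natCast]
    simp [List.getElem?_append, List.getLast?_concat]

theorem pvMinusLoop_eq (full : List Char) : ∀ (tail pre : List Char), full = pre ++ tail →
    pvMinusLoop full (PySem.List.enumerate tail (pre.length : Int)) = pvMinusOk pre.getLast? tail := by
  intro tail
  induction tail with
  | nil => intro pre h; simp [PySem.List.enumerate, pvMinusLoop, pvMinusOk]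
  | cons c cs ih =>
    intro pre h
    have henum : PySem.List.enumerate (c::cs) (pre.length : Int) =
        ((pre.length : Int), c) :: PySem.List.enumerate cs (((pre ++ [c]).length : Nat) : Int) := by
      rw [show PySem.List.enumerate (c::cs) (pre.length : Int) =
          ((pre.length : Int), c) :: PySem.List.enumerate cs ((pre.length : Int) + 1) from rfl]
      norm_num
    have hih := ih (pre ++ [c]) (by simpa using h)
    rw [List.getLast?_concat] at hih
    rw [henum]
    by_cases hc : c = '-'
    · subst hc
      by_cases hp : pre = []
      · subst hp
        rw [show pvMinusLoop full (((([] : List Char).length : Int), '-') ::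
              PySem.List.enumerate cs (((([] : List Char) ++ ['-']).length : Nat) : Int)) =
            pvMinusLoop full (PySem.List.enumerate cs ((((['-'] : List Char)).length : Nat) : Int)) from by
          simp [pvMinusLoop]]
        rw [show (([] : List Char) ++ ['-']) = ['-'] from rfl] at hih
        rw [hih]
        simp [pvMinusOk]
      · have hpos : 0 < pre.length := List.length_pos_iff.mpr hp
        have hne : (((pre.length : Int)) == 0) = false := by simp; omega
        have hgt : decide ((pre.length : Int) > 0) = true := by simp; omega
        have hget : PySem.List.pyGet? full ((pre.length : Int) - 1) = pre.getLast? := by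
          rw [h]; exact pv_getLast pre ('-'::cs) hp
        rcases hlast : pre.getLast? with _ | x
        · exact absurd (List.getLast?_eq_none_iff.mp hlast) hp
        · by_cases hx : x = 'e'
          · subst hx
            rw [show pvMinusLoop full (((pre.length : Int), '-') ::
                  PySem.List.enumerate cs (((pre ++ ['-']).length : Nat) : Int)) =
                pvMinusLoop full (PySem.List.enumerate cs (((pre ++ ['-']).length : Nat) : Int)) from by
              simp only [pvMinusLoop, ne_eq, not_true_eq_false, if_false, hne, Bool.false_eq_true,
                hgt, Bool.true_and, hget, hlast, BEq.rfl, if_true]]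
            rw [hih]
            simp [pvMinusOk, hlast]
          · have hbx : ((some x : Option Char) == some 'e') = false := by simpa using hx
            rw [show pvMinusLoop full (((pre.length : Int), '-') ::
                  PySem.List.enumerate cs (((pre ++ ['-']).length : Nat) : Int)) = false from by
              simp only [pvMinusLoop, ne_eq, not_true_eq_false, if_false, hne, Bool.false_eq_true,
                hgt, Bool.true_and, hget, hlast, hbx, if_false]]
            simp [pvMinusOk, hlast, hx]
    · rw [show pvMinusLoop full (((pre.length : Int), c) ::
            PySem.List.enumerate cs (((pre ++ [c]).length : Nat) : Int)) =
          pvMinusLoop full (PySem.List.enumerate cs (((pre ++ [c]).length : Nat) : Int)) from by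
        simp [pvMinusLoop, hc]]
      rw [hih]
      simp [pvMinusOk, hc]

theorem pv_find_cond (l : List Char) (h1 : l.count 'e' ≤ 1) :
    ((PySem.Chars.find l ['e'] != -1) && (PySem.Chars.findFrom l ['.'] (PySem.Chars.find l ['e']) none != -1))
      = !(pvNoDotAfterE l) := by
  by_cases hfe : PySem.Chars.find l ['e'] = -1
  · have hmem : 'e' ∉ l := by
      have := (PySem.Chars.find_eq_neg_one_iff l ['e']).mp hfe
      simpa [List.singleton_infix_iff] using this
    simp [hfe, pvNoDot_of_not_mem l hmem]
  · have hnn : 0 ≤ PySem.Chars.find l ['e'] := by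
      have := PySem.Chars.neg_one_le_find l ['e']
      omega
    set k := (PySem.Chars.find l ['e']).toNat with hk
    have hcast : PySem.Chars.find l ['e'] = (k : Int) := by omega
    obtain ⟨hpre, hmin⟩ := PySem.Chars.find_spec (s := l) (sub := ['e']) hnn
    obtain ⟨rest, hdrop⟩ : ∃ rest, l.drop k = 'e' :: rest := by
      rcases hd : l.drop k with _ | ⟨y, r⟩
      · rw [← hk, hd] at hpre; simp at hpre
      · rw [← hk, hd] at hpre
        obtain ⟨t, ht⟩ := hpre
        simp only [List.cons_append, List.nil_append] at ht
        obtain ⟨hy, hr⟩ := List.cons.inj ht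
        exact ⟨r, by rw [hy]⟩
    have hklen : k ≤ l.length := by
      by_contra hgt
      rw [List.drop_of_length_le (by omega)] at hdrop; simp at hdrop
    have hsplit : l = l.take k ++ 'e' :: rest := by
      conv_lhs => rw [← List.take_append_drop k l]
      rw [hdrop]
    have hetake : 'e' ∉ l.take k := by
      intro hmem
      obtain ⟨i, hi, hgi⟩ := List.getElem_of_mem hmem
      have hib : i < k ∧ i < l.length := by simpa using hi
      refine hmin i (by rw [← hk]; exact hib.1) ?_
      have hdropi : l.drop i = l[i] :: l.drop (i+1) := List.drop_eq_getElem_cons hib.2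
      have hgl : l[i] = 'e' := by rw [List.getElem_take] at hgi; exact hgi
      rw [hdropi, hgl]
      simp
    have herest : 'e' ∉ rest := by
      intro hmem
      have : 2 ≤ l.count 'e' := by
        rw [hsplit]
        simp [List.count_append, List.count_cons]
        have := List.count_pos_iff.mpr hmem
        omega
      omega
    have hff : (PySem.Chars.findFrom l ['.'] ((k : Nat) : Int) none = -1) ↔ ¬ (['.'] <:+: l.drop k) :=
      PySem.Chars.findFrom_natCast_eq_neg_one_iff l ['.'] k hklen
    have hnd : pvNoDotAfterE l = !(rest.contains '.') := by
      rw [hsplit, pvNoDot_append _ _ hetake]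
      simp [pvNoDotAfterE, pvNoDot_of_not_mem rest herest]
    rw [hcast, hnd]
    by_cases hdot : '.' ∈ rest
    · have : ['.'] <:+: l.drop k := by
        rw [hdrop, List.singleton_infix_iff]; simp [hdot]
      have hne : PySem.Chars.findFrom l ['.'] ((k:Nat):Int) none ≠ -1 := by
        intro hcon; exact (hff.mp hcon) this
      simp only [hcast] at hfe
      simp [hfe, hne, hdot]
    · have : ¬ (['.'] <:+: l.drop k) := by
        rw [hdrop, List.singleton_infix_iff]
        simp [hdot]
      have heq : PySem.Chars.findFrom l ['.'] ((k:Nat):Int) none = -1 := hff.mpr this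
      simp only [hcast] at hfe
      simp [heq, hdot]

theorem pv_main (text : String) :
    is_valid_number_fragment text = is_valid_number_fragment_alt text := by
  unfold is_valid_number_fragment is_valid_number_fragment_alt
  rw [pvAltGo_eq]
  by_cases hempty : text = ""
  · subst hempty
    simp [pvNoDotAfterE, pvMinusOk]
  · have hb : (text == "") = false := by simpa using hempty
    rw [hb]
    simp only [Bool.false_eq_true, if_false, cond_false, add_zero, Bool.and_true]
    have hset : ∀ c : Char, PySem.Set.contains (PySem.Set.ofList "0123456789-.e".toList) c
        = "0123456789-.e".toList.contains c := by
      intro c; simp [pysem]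
    have hany : (text.toList.any fun ch =>
          !(PySem.Set.contains (PySem.Set.ofList "0123456789-.e".toList) ch))
        = !(text.toList.all fun c => "0123456789-.e".toList.contains c) := by
      rw [show (fun ch => !(PySem.Set.contains (PySem.Set.ofList "0123456789-.e".toList) ch))
          = (fun ch => !("0123456789-.e".toList.contains ch)) from funext (fun c => by rw [hset])]
      exact Eq.symm List.not_all_eq_any_not
    rw [hany]
    by_cases hall : (text.toList.all fun c => "0123456789-.e".toList.contains c) = true
    swap
    · have : (text.toList.all fun c => "0123456789-.e".toList.contains c) = false :=
        Bool.not_eq_true _ ▸ (by simpa using hall)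
      rw [this]; simp
    rw [hall]
    simp only [Bool.not_true, Bool.false_eq_true, if_false, Bool.true_and]
    have hce : PySem.Str.count text "e" = text.toList.count 'e' := by
      simp [pv_count_singleton]
    have hcd : PySem.Str.count text "." = text.toList.count '.' := by
      simp [pv_count_singleton]
    rw [hce, hcd]
    by_cases h1 : text.toList.count 'e' ≤ 1
    swap
    · have hgt : text.toList.count 'e' > 1 := by omega
      rw [if_pos hgt]
      have : decide (text.toList.count 'e' ≤ 1) = false := by simpa using h1
      rw [this]; simp
    rw [if_neg (by omega)]
    by_cases h2 : text.toList.count '.' ≤ 1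
    swap
    · have hgt : text.toList.count '.' > 1 := by omega
      rw [if_pos hgt]
      have : decide (text.toList.count '.' ≤ 1) = false := by simpa using h2
      rw [this]; simp
    rw [if_neg (by omega)]
    rw [show decide (text.toList.count 'e' ≤ 1) = true by simpa using h1]
    rw [show decide (text.toList.count '.' ≤ 1) = true by simpa using h2]
    simp only [Bool.true_and, Bool.and_true]
    have hfind : ((PySem.Str.find text "e" != -1) &&
        (PySem.Str.findFrom text "." (PySem.Str.find text "e") none != -1))
        = !(pvNoDotAfterE text.toList) := by
      have hf : PySem.Str.find text "e" = PySem.Chars.find text.toList ['e'] := by simp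
      have hff : ∀ i : Int, PySem.Str.findFrom text "." i none
          = PySem.Chars.findFrom text.toList ['.'] i none := by intro i; simp
      rw [hf, hff]
      exact pv_find_cond text.toList h1
    by_cases hnd : pvNoDotAfterE text.toList = true
    swap
    · have : pvNoDotAfterE text.toList = false := by simpa using hnd
      rw [if_pos (by rw [hfind, this]; simp), this]
      simp
    rw [if_neg (by rw [hfind, hnd]; simp), hnd]
    by_cases hm : '-' ∈ text.toList
    · have hin : PySem.Str.isIn "-" text = true := by
        rw [show PySem.Str.isIn "-" text = PySem.Chars.isIn ['-'] text.toList by simp]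
        rw [PySem.Chars.isIn_iff_infix, List.singleton_infix_iff]
        exact hm
      rw [if_pos hin]
      have := pvMinusLoop_eq text.toList text.toList [] rfl
      simpa using this
    · have hin : PySem.Str.isIn "-" text = false := by
        rw [show PySem.Str.isIn "-" text = PySem.Chars.isIn ['-'] text.toList by simp]
        rw [PySem.Chars.isIn_eq_false_iff, List.singleton_infix_iff]
        exact hm
      rw [if_neg (by rw [hin]; simp)]
      rw [pvMinusOk_of_not_mem none text.toList hm]
      simp

-- ===== VERDICT (by name: the statement is the Claim_ definition above) =====
theorem is_valid_number_fragment_spec : Claim_equal_is_valid_number_fragment := by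
  intro text _
  unfold Spec_is_valid_number_fragment
  exact pv_main text
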